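-- pv_equiv track=rewrite | github.com/galid1/Algorithm | python/3.exams/20.10.09/3.py | solution
-- ===== SOURCE A (Python) =====
-- from collections import Counter
--
-- def solution(k, score):
--     # 차이의 등수와 그 차이값을 묶은 사전
--     dif_pair = {}
--     dif = []
--     for i in range(1, len(score)):
--         dif_value = abs(score[i] - score[i-1])
--         dif.append(dif_value)
--         if dif_value not in dif_pair.keys():
--             dif_pair[dif_value] = [(i, i+1)]
--         else:
--             dif_pair[dif_value].append((i, i+1))
--
--     # 차이 수 구하기
--     dif_dict = dict(Counter(dif))
--
--     # k를 넘는 차이들 (key는 차이값, value는 차이 수)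
--     new_dif = {key:value for key,value in dif_dict.items() if value >= k}
--
--     fake_grades = set()
--     for key in new_dif.keys():
--         for target_pair in dif_pair[key]:
--             fake_grades.add(target_pair[0])
--             fake_grades.add(target_pair[1])
--
--     answer = len(score) - len(fake_grades)
--     return answer
-- ===== SOURCE B (Python) =====
-- from collections import Counter
--
-- def solution(k, score):
--     n = len(score)
--     cnt = Counter(abs(score[i] - score[i - 1]) for i in range(1, n))
--
--     def frequent_at(j):
--         # is the difference between positions j and j+1 (1-based) frequent?
--         return 1 <= j <= n - 1 and cnt[abs(score[j] - score[j - 1])] >= k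
--
--     # a position survives iff neither adjacent difference is frequent
--     return sum(1 for j in range(1, n + 1)
--                if not frequent_at(j) and not frequent_at(j - 1))
-- ===== Notes on version B (the rewrite author's own statement) =====
-- stated objective: alternative
-- what changed: B never builds a set of fake positions: it counts surviving positions directly in one pass over 1..n with a local predicate 'neither adjacent difference is frequent', using only a Counter of consecutive differences.
import Mathlib
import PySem

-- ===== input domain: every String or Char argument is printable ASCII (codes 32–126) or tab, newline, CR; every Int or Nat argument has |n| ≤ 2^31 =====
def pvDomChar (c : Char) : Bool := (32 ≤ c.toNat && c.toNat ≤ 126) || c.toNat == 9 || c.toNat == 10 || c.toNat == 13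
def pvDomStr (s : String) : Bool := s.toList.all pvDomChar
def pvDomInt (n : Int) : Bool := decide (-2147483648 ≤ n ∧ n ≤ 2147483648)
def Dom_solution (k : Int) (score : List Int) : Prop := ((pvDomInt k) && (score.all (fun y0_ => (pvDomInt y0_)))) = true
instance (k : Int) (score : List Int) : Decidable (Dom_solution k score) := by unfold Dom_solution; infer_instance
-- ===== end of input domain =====

-- B never builds a fake-position set: it counts surviving positions directly in one pass over 1..n
-- with a local predicate "neither adjacent difference is frequent" (objective: alternative).


-- ===== PORT A =====
def solution (k : Int) (score : List Int) : Int :=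
  -- for i in range(1, len(score)): build dif_pair (value → list of (i, i+1)) and dif (list of diffs)
  let st := (PySem.List.pyRange 1 (score.length : Int) 1).foldl
    (fun (st : PySem.Dict Int (List (Int × Int)) × List Int) i =>
      ((if st.1.contains (|PySem.List.pyGetD score i 0 - PySem.List.pyGetD score (i - 1) 0|) = false
        then st.1.insert (|PySem.List.pyGetD score i 0 - PySem.List.pyGetD score (i - 1) 0|) [(i, i + 1)]
        else st.1.modify (|PySem.List.pyGetD score i 0 - PySem.List.pyGetD score (i - 1) 0|) []
               (fun l => l ++ [(i, i + 1)])),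
       st.2 ++ [|PySem.List.pyGetD score i 0 - PySem.List.pyGetD score (i - 1) 0|]))
    (PySem.Dict.empty, [])
  let difPair := st.1
  let dif := st.2
  -- dif_dict = dict(Counter(dif)); new_dif = {key: value for ... if value >= k}
  let difDict := PySem.Dict.counter dif
  let newDif : PySem.Dict Int Int := PySem.Dict.mk (difDict.items.filter (fun kv => k ≤ kv.2))
  -- fake_grades = set(); for key in new_dif.keys(): for target_pair in dif_pair[key]: add both
  let fake := newDif.keys.foldl
    (fun (s : PySem.Set Int) key =>
      (difPair.getD key []).foldl
        (fun (s : PySem.Set Int) p => PySem.Set.add (PySem.Set.add s p.1) p.2) s)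
    PySem.Set.empty
  (score.length : Int) - (fake.length : Int)

-- ===== PORT B =====
def solution_alt (k : Int) (score : List Int) : Int :=
  let n := (score.length : Int)
  -- cnt = Counter(abs(score[i] - score[i-1]) for i in range(1, n))
  let cnt := PySem.Dict.counter ((PySem.List.pyRange 1 n 1).map
    (fun i => |PySem.List.pyGetD score i 0 - PySem.List.pyGetD score (i - 1) 0|))
  -- frequent_at(j): 1 <= j <= n-1 and cnt[abs(score[j]-score[j-1])] >= k
  let frequentAt := fun (j : Int) =>
    decide (1 ≤ j) && decide (j ≤ n - 1) &&
      decide (k ≤ cnt.getD (|PySem.List.pyGetD score j 0 - PySem.List.pyGetD score (j - 1) 0|) 0)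
  -- sum(1 for j in range(1, n+1) if not frequent_at(j) and not frequent_at(j-1))
  (((PySem.List.pyRange 1 (n + 1) 1).filter
      (fun j => !(frequentAt j) && !(frequentAt (j - 1)))).length : Int)

-- ===== PRECONDITION & SPEC =====
def Spec_solution (k : Int) (score : List Int) (out : Int) : Prop := out = solution_alt k score
instance (k : Int) (score : List Int) (out : Int) : Decidable (Spec_solution k score out) := by unfold Spec_solution; infer_instance

-- ===== CLAIM (what is proved, stated in full; the proofs are below) =====
def Claim_equal_solution : Prop := ∀ (k : Int) (score : List Int), Dom_solution k score → Spec_solution k score (solution k score)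

-- ===== LEMMAS AND PROOFS =====

theorem pv_mem_foldl_addPair (l : List (Int × Int)) (s : PySem.Set Int) (x : Int) :
    (x ∈ l.foldl (fun s p => PySem.Set.add (PySem.Set.add s p.1) p.2) s)
      ↔ x ∈ s ∨ ∃ p ∈ l, x = p.1 ∨ x = p.2 := by
  induction l generalizing s with
  | nil => simp
  | cons hd t ih => simp [ih, PySem.Set.mem_add, or_assoc]

theorem pv_nodup_foldl_addPair (l : List (Int × Int)) (s : PySem.Set Int) (h : s.Nodup) :
    (l.foldl (fun s p => PySem.Set.add (PySem.Set.add s p.1) p.2) s).Nodup := by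
  induction l generalizing s with
  | nil => exact h
  | cons hd t ih => exact ih _ (PySem.Set.nodup_add _ _ (PySem.Set.nodup_add _ _ h))

theorem pv_mem_foldl_keys (keys : List Int) (g : Int → List (Int × Int)) (s : PySem.Set Int) (x : Int) :
    (x ∈ keys.foldl (fun s v => (g v).foldl (fun s p => PySem.Set.add (PySem.Set.add s p.1) p.2) s) s)
      ↔ x ∈ s ∨ ∃ v ∈ keys, ∃ p ∈ g v, x = p.1 ∨ x = p.2 := by
  induction keys generalizing s with
  | nil => simp
  | cons hd t ih => simp [ih, pv_mem_foldl_addPair, or_assoc]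

theorem pv_nodup_foldl_keys (keys : List Int) (g : Int → List (Int × Int)) (s : PySem.Set Int) (h : s.Nodup) :
    (keys.foldl (fun s v => (g v).foldl (fun s p => PySem.Set.add (PySem.Set.add s p.1) p.2) s) s).Nodup := by
  induction keys generalizing s with
  | nil => exact h
  | cons hd t ih => exact ih _ (pv_nodup_foldl_addPair _ _ h)

theorem pv_step_eq_modify (d : PySem.Dict Int (List (Int × Int))) (v : Int) (pr : Int × Int) :
    (if d.contains v = false then d.insert v [pr] else d.modify v [] (fun l => l ++ [pr]))
      = d.modify v [] (fun l => l ++ [pr]) := by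
  by_cases h : d.contains v = false
  · simp only [h, if_pos]
    unfold PySem.Dict.modify
    rw [PySem.Dict.getD_of_not_contains d [] h]
    rfl
  · simp [h]

theorem pv_dict_getD (score : List Int) (v : Int) :
    ((PySem.List.pyRange 1 (score.length : Int) 1).foldl
      (fun (d : PySem.Dict Int (List (Int × Int))) i =>
        if d.contains (|PySem.List.pyGetD score i 0 - PySem.List.pyGetD score (i - 1) 0|) = false
        then d.insert (|PySem.List.pyGetD score i 0 - PySem.List.pyGetD score (i - 1) 0|) [(i, i + 1)]
        else d.modify (|PySem.List.pyGetD score i 0 - PySem.List.pyGetD score (i - 1) 0|) []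
               (fun l => l ++ [(i, i + 1)]))
      PySem.Dict.empty).getD v []
    = ((PySem.List.pyRange 1 (score.length : Int) 1).filter
        (fun i => |PySem.List.pyGetD score i 0 - PySem.List.pyGetD score (i - 1) 0| == v)).map
        (fun i => (i, i + 1)) := by
  rw [PySem.List.foldl_congr_mem
    (f := fun (d : PySem.Dict Int (List (Int × Int))) i =>
      if d.contains (|PySem.List.pyGetD score i 0 - PySem.List.pyGetD score (i - 1) 0|) = false
      then d.insert (|PySem.List.pyGetD score i 0 - PySem.List.pyGetD score (i - 1) 0|) [(i, i + 1)]
      else d.modify (|PySem.List.pyGetD score i 0 - PySem.List.pyGetD score (i - 1) 0|) []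
             (fun l => l ++ [(i, i + 1)]))
    (g := fun (d : PySem.Dict Int (List (Int × Int))) i =>
      d.modify (|PySem.List.pyGetD score i 0 - PySem.List.pyGetD score (i - 1) 0|) []
        (fun l => l ++ [(i, i + 1)]))
    (init := PySem.Dict.empty)
    (l := PySem.List.pyRange 1 (score.length : Int) 1)
    (fun d i _ => pv_step_eq_modify d _ _)]
  rw [← List.foldl_map (f := fun i =>
        ((|PySem.List.pyGetD score i 0 - PySem.List.pyGetD score (i - 1) 0|), (i, i + 1)))
      (g := fun (d : PySem.Dict Int (List (Int × Int))) p => d.modify p.1 [] (fun l => l ++ [p.2]))]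
  rw [PySem.Dict.getD_foldl_modify_append]
  simp [List.filter_map, List.map_map, Function.comp_def]

theorem pv_filter_split {α : Type} (l : List α) (p : α → Bool) :
    (l.filter p).length + (l.filter (fun x => !p x)).length = l.length := by
  induction l with
  | nil => simp
  | cons h t ih => by_cases hp : p h <;> simp [hp] <;> omega

theorem pv_count (n : Int) (hn : 0 ≤ n) (F : Int → Bool) :
    n - (((PySem.List.pyRange 1 (n + 1) 1).filter (fun j => F j || F (j - 1))).length : Int)
      = (((PySem.List.pyRange 1 (n + 1) 1).filter (fun j => !(F j) && !(F (j - 1)))).length : Int) := by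
  have hcong : (PySem.List.pyRange 1 (n + 1) 1).filter (fun j => !(F j || F (j - 1)))
      = (PySem.List.pyRange 1 (n + 1) 1).filter (fun j => !(F j) && !(F (j - 1))) := by
    simp [Bool.not_or]
  have hs := pv_filter_split (PySem.List.pyRange 1 (n + 1) 1) (fun j => F j || F (j - 1))
  rw [hcong] at hs
  have hlen : (PySem.List.pyRange 1 (n + 1) 1).length = n.toNat := by
    rw [PySem.List.length_pyRange_one]; omega
  omega

-- membership in A's fake set, in closed form
theorem pv_fake_mem (k : Int) (score : List Int) (x : Int) :
    (x ∈ (PySem.Dict.mk (((PySem.Dict.counter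
            ((PySem.List.pyRange 1 (score.length : Int) 1).map
              (fun i => |PySem.List.pyGetD score i 0 - PySem.List.pyGetD score (i - 1) 0|))).items).filter
            (fun kv => k ≤ kv.2)) : PySem.Dict Int Int).keys.foldl
        (fun (s : PySem.Set Int) key =>
          ((((PySem.List.pyRange 1 (score.length : Int) 1).foldl
              (fun (d : PySem.Dict Int (List (Int × Int))) i =>
                if d.contains (|PySem.List.pyGetD score i 0 - PySem.List.pyGetD score (i - 1) 0|) = false
                then d.insert (|PySem.List.pyGetD score i 0 - PySem.List.pyGetD score (i - 1) 0|) [(i, i + 1)]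
                else d.modify (|PySem.List.pyGetD score i 0 - PySem.List.pyGetD score (i - 1) 0|) []
                       (fun l => l ++ [(i, i + 1)]))
              PySem.Dict.empty).getD key []).foldl
            (fun (s : PySem.Set Int) p => PySem.Set.add (PySem.Set.add s p.1) p.2) s))
        PySem.Set.empty)
    ↔ ∃ j : Int, 1 ≤ j ∧ j < (score.length : Int) ∧
        k ≤ ((PySem.List.pyRange 1 (score.length : Int) 1).map
              (fun i => |PySem.List.pyGetD score i 0 - PySem.List.pyGetD score (i - 1) 0|)).count
              (|PySem.List.pyGetD score j 0 - PySem.List.pyGetD score (j - 1) 0|) ∧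
        (x = j ∨ x = j + 1) := by
  rw [pv_mem_foldl_keys]
  simp only [pv_dict_getD, PySem.Dict.keys_mk, PySem.Dict.items_counter,
    List.filter_map, List.map_map, Function.comp_def, List.mem_map, List.mem_filter,
    PySem.Set.mem_ofList, PySem.Set.empty, List.not_mem_nil, false_or,
    PySem.List.mem_pyRange_one]
  constructor
  · rintro ⟨v, ⟨a, ⟨⟨a1, ⟨ha11, ha12⟩, hda⟩, hcnt⟩, rfl⟩, p, ⟨b, ⟨⟨hb1, hb2⟩, hbeq⟩, rfl⟩, hx⟩
    have hdb : |PySem.List.pyGetD score b 0 - PySem.List.pyGetD score (b - 1) 0| = a := by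
      simpa using hbeq
    refine ⟨b, hb1, hb2, ?_, by simpa using hx⟩
    rw [hdb]
    simpa using hcnt
  · rintro ⟨j, hj1, hj2, hcnt, hx⟩
    exact ⟨|PySem.List.pyGetD score j 0 - PySem.List.pyGetD score (j - 1) 0|,
      ⟨|PySem.List.pyGetD score j 0 - PySem.List.pyGetD score (j - 1) 0|,
        ⟨⟨j, ⟨hj1, hj2⟩, rfl⟩, by simpa using hcnt⟩, rfl⟩,
      (j, j + 1), ⟨j, ⟨⟨hj1, hj2⟩, by simp⟩, rfl⟩, by simpa using hx⟩


-- the "frequent_at" predicate of B, as a named helper for the proofs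
def pvF (k : Int) (score : List Int) (j : Int) : Bool :=
  decide (1 ≤ j) && decide (j ≤ (score.length : Int) - 1) &&
    decide (k ≤ (PySem.Dict.counter ((PySem.List.pyRange 1 (score.length : Int) 1).map
        (fun i => |PySem.List.pyGetD score i 0 - PySem.List.pyGetD score (i - 1) 0|))).getD
        (|PySem.List.pyGetD score j 0 - PySem.List.pyGetD score (j - 1) 0|) 0)

theorem pvF_true_iff (k : Int) (score : List Int) (j : Int) :
    pvF k score j = true ↔ 1 ≤ j ∧ j ≤ (score.length : Int) - 1 ∧
      k ≤ (((PySem.List.pyRange 1 (score.length : Int) 1).map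
              (fun i => |PySem.List.pyGetD score i 0 - PySem.List.pyGetD score (i - 1) 0|)).count
              (|PySem.List.pyGetD score j 0 - PySem.List.pyGetD score (j - 1) 0|) : Int) := by
  simp [pvF, PySem.Dict.getD_counter, and_assoc]

theorem pv_main (k : Int) (score : List Int) : solution k score = solution_alt k score := by
  unfold solution solution_alt
  rw [PySem.List.foldl_prod_mk
    (f := fun (d : PySem.Dict Int (List (Int × Int))) (i : Int) =>
      (if d.contains (|PySem.List.pyGetD score i 0 - PySem.List.pyGetD score (i - 1) 0|) = false
        then d.insert (|PySem.List.pyGetD score i 0 - PySem.List.pyGetD score (i - 1) 0|) [(i, i + 1)]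
        else d.modify (|PySem.List.pyGetD score i 0 - PySem.List.pyGetD score (i - 1) 0|) []
               (fun l => l ++ [(i, i + 1)])))
    (g := fun (l : List Int) (i : Int) =>
      l ++ [|PySem.List.pyGetD score i 0 - PySem.List.pyGetD score (i - 1) 0|])]
  rw [PySem.List.foldl_append_singleton_eq_map]
  simp only [List.nil_append]
  have hfl : (((PySem.Dict.mk (((PySem.Dict.counter
            ((PySem.List.pyRange 1 (score.length : Int) 1).map
              (fun i => |PySem.List.pyGetD score i 0 - PySem.List.pyGetD score (i - 1) 0|))).items).filter
            (fun kv => k ≤ kv.2)) : PySem.Dict Int Int).keys.foldl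
        (fun (s : PySem.Set Int) key =>
          ((((PySem.List.pyRange 1 (score.length : Int) 1).foldl
              (fun (d : PySem.Dict Int (List (Int × Int))) i =>
                if d.contains (|PySem.List.pyGetD score i 0 - PySem.List.pyGetD score (i - 1) 0|) = false
                then d.insert (|PySem.List.pyGetD score i 0 - PySem.List.pyGetD score (i - 1) 0|) [(i, i + 1)]
                else d.modify (|PySem.List.pyGetD score i 0 - PySem.List.pyGetD score (i - 1) 0|) []
                       (fun l => l ++ [(i, i + 1)]))
              PySem.Dict.empty).getD key []).foldl
            (fun (s : PySem.Set Int) p => PySem.Set.add (PySem.Set.add s p.1) p.2) s))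
        PySem.Set.empty).length)
      = (((PySem.List.pyRange 1 ((score.length : Int) + 1) 1).filter
          (fun j => pvF k score j || pvF k score (j - 1))).length) := by
    apply List.Perm.length_eq
    apply (List.perm_ext_iff_of_nodup ?_ ?_).2
    · intro x
      rw [pv_fake_mem k score x]
      simp only [List.mem_filter, PySem.List.mem_pyRange_one, Bool.or_eq_true, pvF_true_iff]
      constructor
      · rintro ⟨j, hj1, hj2, hcnt, hx | hx⟩
        · subst hx
          exact ⟨⟨hj1, by omega⟩, Or.inl ⟨hj1, by omega, hcnt⟩⟩
        · subst hx
          refine ⟨⟨by omega, by omega⟩, Or.inr ?_⟩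
          rw [Int.add_sub_cancel]
          exact ⟨hj1, by omega, hcnt⟩
      · rintro ⟨⟨hx1, hx2⟩, ⟨h1, h2, hcnt⟩ | ⟨h1, h2, hcnt⟩⟩
        · exact ⟨x, h1, by omega, hcnt, Or.inl rfl⟩
        · exact ⟨x - 1, h1, by omega, hcnt, Or.inr (by omega)⟩
    · exact pv_nodup_foldl_keys _ _ _ List.nodup_nil
    · exact (PySem.List.nodup_pyRange_one 1 ((score.length : Int) + 1)).filter _
  rw [hfl]
  exact pv_count (score.length : Int) (by positivity) (pvF k score)

-- ===== VERDICT (by name: the statement is the Claim_ definition above) =====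
theorem solution_spec : Claim_equal_solution := by
  intro k score _
  exact pv_main k score
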